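-- pv_equiv track=rewrite | github.com/ashenafiDL/AOC | 2025/day02.py | check_split_equal
-- ===== SOURCE A (Python) =====
-- import math
--
-- def count_digits(n):
--     if n <= 0:
--         raise ValueError("n must be a positive integer")
--     return int(math.log10(n)) + 1
--
-- def check_split_equal(num, parts):
--     length = count_digits(num)
--
--     s = str(num)
--
--     # cannot split evenly
--     if length % parts != 0:
--         return False
--
--     size = length // parts
--     chunks = [s[i * size : (i + 1) * size] for i in range(parts)]
--
--     # check if all chunks are identical
--     return len(set(chunks)) == 1
-- ===== SOURCE B (Python) =====
-- def check_split_equal(num, parts):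
--     # count digits by repeated division (num must be positive for a meaningful answer)
--     length = 0
--     n = num
--     while n > 0:
--         length += 1
--         n //= 10
--     # parts must be a positive divisor of the digit count
--     if parts <= 0 or length % parts != 0:
--         return False
--     # peel fixed-width chunks arithmetically and compare them to the lowest one
--     base = 10 ** (length // parts)
--     first = num % base
--     n = num
--     while n > 0:
--         if n % base != first:
--             return False
--         n //= base
--     return True
-- ===== Notes on version B (the rewrite author's own statement) =====
-- stated objective: alternative
-- what changed: Replaces str/slicing/set machinery by pure integer arithmetic: digit count by repeated division, then chunks peeled with n % base / n //= base and compared to the lowest chunk with early exit.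
import Mathlib
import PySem

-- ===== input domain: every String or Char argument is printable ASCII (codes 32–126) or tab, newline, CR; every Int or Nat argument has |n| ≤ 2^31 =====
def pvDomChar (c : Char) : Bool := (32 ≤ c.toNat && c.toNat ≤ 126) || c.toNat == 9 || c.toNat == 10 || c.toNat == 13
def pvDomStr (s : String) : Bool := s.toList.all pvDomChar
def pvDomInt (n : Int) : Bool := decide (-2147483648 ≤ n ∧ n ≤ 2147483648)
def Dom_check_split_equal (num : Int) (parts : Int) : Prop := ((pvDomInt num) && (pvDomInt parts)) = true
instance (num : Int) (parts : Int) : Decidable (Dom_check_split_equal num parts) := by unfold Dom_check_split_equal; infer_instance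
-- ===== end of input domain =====

-- B replaces A's str/slicing/set machinery by pure integer arithmetic (digit count by repeated
-- division, chunks peeled with mod/div and compared to the lowest chunk); equivalence proved on
-- Pre_ (num ≥ 1, parts ≠ 0), exactly where the Python A returns without raising.

-- ===== PORT A =====
-- int(math.log10(n)) + 1 ported as Nat.log 10 n + 1 (exact on the admitted 1 ≤ n ≤ 2^31,
-- where float log10 truncates to the same value); the ValueError for n ≤ 0 is excluded by Pre_.
def count_digits (n : Int) : Int := (Nat.log 10 n.toNat : Int) + 1

def check_split_equal (num : Int) (parts : Int) : Bool :=
  let length := count_digits num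
  let s := PySem.Int.toStr num
  if PySem.Int.mod length parts ≠ 0 then false
  else
    let size := PySem.Int.floordiv length parts
    let chunks := (PySem.List.pyRange 0 parts 1).map
      (fun i => PySem.Str.slice s (some (i * size)) (some ((i + 1) * size)))
    PySem.Set.len (PySem.Set.ofList chunks) == 1

-- ===== PORT B =====
-- 'while n > 0: length += 1; n //= 10'  (fuel = num.toNat bounds the iteration count)
def pvLenLoop (fuel : Nat) (n : Int) (length : Int) : Int :=
  match fuel with
  | 0 => length
  | fuel + 1 => if n ≤ 0 then length else pvLenLoop fuel (PySem.Int.floordiv n 10) (length + 1)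

-- 'while n > 0: if n % base != first: return False; n //= base' then 'return True'
def pvChunkLoop (fuel : Nat) (n : Int) (base : Int) (first : Int) : Bool :=
  match fuel with
  | 0 => true
  | fuel + 1 =>
    if n ≤ 0 then true
    else if PySem.Int.mod n base ≠ first then false
    else pvChunkLoop fuel (PySem.Int.floordiv n base) base first

def check_split_equal_alt (num : Int) (parts : Int) : Bool :=
  let length := pvLenLoop num.toNat num 0
  if parts ≤ 0 ∨ PySem.Int.mod length parts ≠ 0 then false
  else
    let base : Int := (10 : Int) ^ (PySem.Int.floordiv length parts).toNat
    let first := PySem.Int.mod num base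
    pvChunkLoop num.toNat num base first

-- ===== PRECONDITION & SPEC =====
-- Pre_ excludes exactly the inputs on which the Python A raises:
-- num ≤ 0 (ValueError in count_digits) and parts = 0 (ZeroDivisionError in length % parts).
def Pre_check_split_equal (num : Int) (parts : Int) : Prop := 1 ≤ num ∧ parts ≠ 0
instance (num : Int) (parts : Int) : Decidable (Pre_check_split_equal num parts) := by
  unfold Pre_check_split_equal; infer_instance

def pvWitness_check_split_equal : Int × Int := (1212, 2)

def Spec_check_split_equal (num : Int) (parts : Int) (out : Bool) : Prop := out = check_split_equal_alt num parts
instance (num : Int) (parts : Int) (out : Bool) : Decidable (Spec_check_split_equal num parts out) := by unfold Spec_check_split_equal; infer_instance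

-- ===== CLAIM (what is proved, stated in full; the proofs are below) =====
def Claim_equal_check_split_equal : Prop := ∀ (num : Int) (parts : Int), Dom_check_split_equal num parts → Pre_check_split_equal num parts → Spec_check_split_equal num parts (check_split_equal num parts)

-- ===== LEMMAS AND PROOFS =====

-- fixed-width big-endian decimal rendering of n (mod 10^L), the shape of A's chunks
def pvPad : Nat → Nat → List Char
  | 0, _ => []
  | L + 1, n => pvPad L (n / 10) ++ [Nat.digitChar (n % 10)]

theorem pvPad_length (L n : Nat) : (pvPad L n).length = L := by
  induction L generalizing n with
  | zero => simp [pvPad]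
  | succ L ih => simp [pvPad, ih]

theorem pvDigitChar_inj (a b : Nat) (ha : a < 10) (hb : b < 10)
    (h : Nat.digitChar a = Nat.digitChar b) : a = b := by
  revert h; interval_cases a <;> interval_cases b <;> decide

theorem pvPad_mod (L n : Nat) : pvPad L n = pvPad L (n % 10 ^ L) := by
  induction L generalizing n with
  | zero => rfl
  | succ L ih =>
    have h1 : n % 10 ^ (L + 1) / 10 = n / 10 % 10 ^ L := by
      rw [pow_succ']; exact Nat.mod_mul_right_div_self n 10 (10 ^ L)
    have h2 : n % 10 ^ (L + 1) % 10 = n % 10 :=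
      Nat.mod_mod_of_dvd n (dvd_pow_self 10 (Nat.succ_ne_zero L))
    simp only [pvPad, h1, h2, ← ih]

theorem pvPad_inj (L x y : Nat) (hx : x < 10 ^ L) (hy : y < 10 ^ L)
    (h : pvPad L x = pvPad L y) : x = y := by
  induction L generalizing x y with
  | zero => simp at hx hy; omega
  | succ L ih =>
    simp only [pvPad] at h
    have h' := List.append_inj' h rfl
    have e1 : x / 10 = y / 10 := by
      apply ih _ _ _ _ h'.1 <;> · rw [pow_succ] at *; omega
    have e2 : x % 10 = y % 10 := by
      apply pvDigitChar_inj _ _ (Nat.mod_lt _ (by norm_num)) (Nat.mod_lt _ (by norm_num))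
      simpa using h'.2
    omega

theorem pvPad_append (a b n : Nat) : pvPad (a + b) n = pvPad a (n / 10 ^ b) ++ pvPad b n := by
  induction b generalizing n with
  | zero => simp [pvPad]
  | succ b ih =>
    have : a + (b + 1) = (a + b) + 1 := by omega
    rw [this]
    simp only [pvPad, ih (n / 10)]
    rw [Nat.div_div_eq_div_mul, ← pow_succ']
    simp

theorem pvDropLen {α : Type} (a : Nat) (l1 l2 : List α) (h : l1.length = a) :
    (l1 ++ l2).drop a = l2 := by rw [← h, List.drop_left]

theorem pvTakeLen {α : Type} (c : Nat) (l1 l2 : List α) (h : l1.length = c) :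
    (l1 ++ l2).take c = l1 := by rw [← h, List.take_left]

theorem pvPad_chunk (L a c n : Nat) (h : a + c ≤ L) :
    ((pvPad L n).drop a).take c = pvPad c (n / 10 ^ (L - a - c)) := by
  have hL : L = a + (L - a) := by omega
  rw [hL, pvPad_append, pvDropLen a _ _ (pvPad_length a _)]
  have hc : L - a = c + (L - a - c) := by omega
  rw [hc, pvPad_append, pvTakeLen c _ _ (pvPad_length c _)]
  have : a + (c + (L - a - c)) - a - c = L - a - c := by omega
  rw [this]

theorem pvToDigitsCore_eq (f : Nat) : ∀ (n : Nat) (acc : List Char), n < 10 ^ f →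
    Nat.toDigitsCore 10 (f + 1) n acc = pvPad (Nat.log 10 n + 1) n ++ acc := by
  induction f with
  | zero =>
    intro n acc hn
    interval_cases n
    simp [Nat.toDigitsCore, pvPad]
  | succ f ih =>
    intro n acc hn
    by_cases h : n / 10 = 0
    · have hn10 : n < 10 := by omega
      have hlog : Nat.log 10 n = 0 := Nat.log_eq_zero_iff.mpr (Or.inl hn10)
      simp [Nat.toDigitsCore, h, hlog, pvPad]
    · have h10 : 10 ≤ n := by omega
      have hdiv : n / 10 < 10 ^ f := by
        rw [Nat.div_lt_iff_lt_mul (by norm_num)]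
        calc n < 10 ^ (f + 1) := hn
        _ = 10 ^ f * 10 := by ring
      have hlog : Nat.log 10 n = Nat.log 10 (n / 10) + 1 := by
        have := Nat.log_div_base 10 n
        have hpos : 0 < Nat.log 10 n := Nat.log_pos (by norm_num) h10
        omega
      rw [show Nat.toDigitsCore 10 (f + 1 + 1) n acc
            = Nat.toDigitsCore 10 (f + 1) (n / 10) (Nat.digitChar (n % 10) :: acc) by
          simp [Nat.toDigitsCore, h]]
      rw [ih (n / 10) _ hdiv, hlog]
      simp [pvPad]

theorem pvToDigits_eq_pad (n : Nat) : Nat.toDigits 10 n = pvPad (Nat.log 10 n + 1) n := by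
  have := pvToDigitsCore_eq n n [] (Nat.lt_pow_self (by norm_num))
  simpa [Nat.toDigits] using this

theorem pvLenLoop_spec (fuel : Nat) : ∀ (N : Nat) (acc : Int), 0 < N → N ≤ fuel →
    pvLenLoop fuel (N : Int) acc = acc + (Nat.log 10 N : Int) + 1 := by
  induction fuel with
  | zero => intro N acc h1 h2; omega
  | succ fuel ih =>
    intro N acc h1 h2
    rw [pvLenLoop]
    have hpos : ¬ ((N : Int) ≤ 0) := by omega
    rw [if_neg hpos]
    have hfd : PySem.Int.floordiv (N : Int) 10 = ((N / 10 : Nat) : Int) := by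
      exact_mod_cast PySem.Int.floordiv_natCast N 10
    rw [hfd]
    by_cases h : N < 10
    · have : N / 10 = 0 := Nat.div_eq_of_lt h
      rw [this]
      have hlog : Nat.log 10 N = 0 := Nat.log_eq_zero_iff.mpr (Or.inl h)
      have : pvLenLoop fuel ((0 : Nat) : Int) (acc + 1) = acc + 1 := by
        cases fuel <;> simp [pvLenLoop]
      push_cast at this ⊢
      rw [this, hlog]; push_cast; ring
    · have h10 : 10 ≤ N := by omega
      have := ih (N / 10) (acc + 1) (by omega) (by omega)
      rw [this]
      have hlog : Nat.log 10 N = Nat.log 10 (N / 10) + 1 := by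
        have := Nat.log_div_base 10 N
        have := Nat.log_pos (b := 10) (by norm_num) h10
        omega
      rw [hlog]; push_cast; ring

theorem pvChunkLoop_spec (B : Nat) (first : Int) (hB : 2 ≤ B) :
    ∀ (k fuel N : Nat), N ≤ fuel → (0 < k → B ^ (k - 1) ≤ N) → N < B ^ k →
    (pvChunkLoop fuel (N : Int) (B : Int) first = true ↔
      ∀ i < k, ((N / B ^ i % B : Nat) : Int) = first) := by
  intro k
  induction k with
  | zero =>
    intro fuel N _ _ hup
    have : N = 0 := by simpa using hup
    subst this
    have h0 : pvChunkLoop fuel ((0 : Nat) : Int) (B : Int) first = true := by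
      cases fuel <;> simp [pvChunkLoop]
    push_cast at h0
    simp [h0]
  | succ k ih =>
    intro fuel N hf hlo hup
    have hNpos : 0 < N := by
      have := hlo (Nat.succ_pos k)
      have : 1 ≤ B ^ (k + 1 - 1) := Nat.one_le_pow _ _ (by omega)
      omega
    obtain ⟨f, rfl⟩ : ∃ f, fuel = f + 1 := ⟨fuel - 1, by omega⟩
    rw [pvChunkLoop]
    rw [if_neg (by omega : ¬ ((N : Int) ≤ 0))]
    have hmod : PySem.Int.mod (N : Int) (B : Int) = ((N % B : Nat) : Int) := by
      exact_mod_cast PySem.Int.mod_natCast N B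
    have hfd : PySem.Int.floordiv (N : Int) (B : Int) = ((N / B : Nat) : Int) := by
      exact_mod_cast PySem.Int.floordiv_natCast N B
    rw [hmod, hfd]
    by_cases hc : ((N % B : Nat) : Int) = first
    · rw [if_neg (by simpa using hc)]
      have hih := ih f (N / B) (by
          have : N / B < N := Nat.div_lt_self hNpos (by omega)
          omega)
        (by
          intro hk
          have := hlo (Nat.succ_pos k)
          rw [Nat.le_div_iff_mul_le (by omega)]
          calc B ^ (k - 1) * B = B ^ (k - 1 + 1) := by ring
          _ ≤ N := by
            have : k - 1 + 1 = k + 1 - 1 := by omega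
            rw [this]; exact hlo (Nat.succ_pos k))
        (by
          rw [Nat.div_lt_iff_lt_mul (by omega)]
          calc N < B ^ (k + 1) := hup
          _ = B ^ k * B := by ring)
      rw [hih]
      constructor
      · intro h i hi
        rcases Nat.eq_zero_or_pos i with rfl | hipos
        · simpa using hc
        · have := h (i - 1) (by omega)
          have hrw : N / B / B ^ (i - 1) = N / B ^ i := by
            rw [Nat.div_div_eq_div_mul, ← pow_succ']
            have he : i - 1 + 1 = i := by omega
            rw [he]
          rw [hrw] at this
          exact this
      · intro h i hi
        have := h (i + 1) (by omega)
        rw [Nat.div_div_eq_div_mul, ← pow_succ']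
        exact this
    · rw [if_pos (by simpa using hc)]
      constructor
      · intro h; cases h
      · intro h
        exfalso
        have := h 0 (Nat.succ_pos k)
        simp at this
        exact hc (by simpa using this)

-- a Python set has one element exactly when the list it was built from is constant
theorem pvSetLenOne {α : Type} [BEq α] [LawfulBEq α] (l : List α) (hl : l ≠ []) :
    (PySem.Set.len (PySem.Set.ofList l) == (1 : Int)) = true ↔ ∀ x ∈ l, ∀ y ∈ l, x = y := by
  rw [beq_iff_eq, PySem.Set.len]
  have hlen1 : ((PySem.Set.ofList l).length : Int) = 1 ↔ (PySem.Set.ofList l).length = 1 := by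
    omega
  rw [hlen1, List.length_eq_one_iff]
  constructor
  · rintro ⟨a, ha⟩ x hx y hy
    have hx' : x ∈ PySem.Set.ofList l := (PySem.Set.mem_ofList _ _).mpr hx
    have hy' : y ∈ PySem.Set.ofList l := (PySem.Set.mem_ofList _ _).mpr hy
    rw [ha] at hx' hy'
    simp at hx' hy'
    rw [hx', hy']
  · intro h
    obtain ⟨z, t, rfl⟩ := List.exists_cons_of_ne_nil hl
    have hz : z ∈ PySem.Set.ofList (z :: t) := (PySem.Set.mem_ofList _ _).mpr (List.mem_cons_self)
    have hall : ∀ x ∈ PySem.Set.ofList (z :: t), x = z := by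
      intro x hx
      exact h x ((PySem.Set.mem_ofList _ _).mp hx) z List.mem_cons_self
    have hnd := PySem.Set.nodup_ofList (xs := z :: t)
    cases e : PySem.Set.ofList (z :: t) with
    | nil => rw [e] at hz; cases hz
    | cons a s' =>
      cases s' with
      | nil => exact ⟨a, rfl⟩
      | cons b t' =>
        exfalso
        rw [e] at hall hnd
        have ha := hall a List.mem_cons_self
        have hb := hall b (by simp)
        rw [List.nodup_cons] at hnd
        exact hnd.1 (by simp [ha, hb])

-- ===== VERDICT (by name: the statement is the Claim_ definition above) =====
theorem check_split_equal_spec : Claim_equal_check_split_equal := by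
  intro num parts _ hpre
  obtain ⟨hnum, hpz⟩ := hpre
  unfold Spec_check_split_equal
  obtain ⟨N, rfl⟩ : ∃ N : Nat, num = (N : Int) :=
    ⟨num.toNat, (Int.toNat_of_nonneg (by omega)).symm⟩
  have hN : 1 ≤ N := by exact_mod_cast hnum
  have htoNat : ((N : Int)).toNat = N := Int.toNat_natCast N
  set L : Nat := Nat.log 10 N + 1 with hLdef
  have hlenA : count_digits (N : Int) = (L : Int) := by
    unfold count_digits; rw [htoNat, hLdef]; push_cast; ring
  have hlenB : pvLenLoop ((N : Int)).toNat (N : Int) 0 = (L : Int) := by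
    rw [htoNat, pvLenLoop_spec N N 0 (by omega) (le_refl N), hLdef]
    push_cast; ring
  rw [check_split_equal, check_split_equal_alt]
  simp only [hlenA, hlenB]
  by_cases hp : parts ≤ 0
  · -- parts < 0: both sides are false
    rw [if_pos (Or.inl hp)]
    by_cases hm : PySem.Int.mod (L : Int) parts = 0
    · rw [if_neg (by simpa using hm)]
      rw [PySem.List.pyRange_one_eq_nil hp]
      simp [PySem.Set.ofList, PySem.Set.len]
    · rw [if_pos (by simpa using hm)]
  · -- parts = p ≥ 1
    rw [not_le] at hp
    obtain ⟨p, rfl⟩ : ∃ p : Nat, parts = (p : Int) :=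
      ⟨parts.toNat, (Int.toNat_of_nonneg (by omega)).symm⟩
    have hppos : 1 ≤ p := by exact_mod_cast hp
    have hmodc : PySem.Int.mod (L : Int) (p : Int) = ((L % p : Nat) : Int) := by
      exact_mod_cast PySem.Int.mod_natCast L p
    by_cases hLP : L % p = 0
    case neg =>
      have hA : PySem.Int.mod (L : Int) (p : Int) ≠ 0 := by
        rw [hmodc]; exact_mod_cast hLP
      rw [if_pos hA, if_pos (Or.inr hA)]
    case pos =>
      have hA : ¬ (PySem.Int.mod (L : Int) (p : Int) ≠ 0) := by
        rw [hmodc]; simp [hLP]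
      have hB : ¬ ((p : Int) ≤ 0 ∨ PySem.Int.mod (L : Int) (p : Int) ≠ 0) := by
        rintro (h | h)
        · omega
        · exact hA h
      rw [if_neg hA, if_neg hB]
      -- main case: parts ≥ 1 divides the digit count L
      have hdvd : p ∣ L := Nat.dvd_of_mod_eq_zero hLP
      set sz : Nat := L / p with hszdef
      have hLsz : p * sz = L := Nat.mul_div_cancel' hdvd
      have hsz : 1 ≤ sz := by
        rcases Nat.eq_zero_or_pos sz with h | h
        · rw [h, Nat.mul_zero] at hLsz; omega
        · exact h
      set BB : Nat := 10 ^ sz with hBBdef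
      have hBB : 2 ≤ BB := by
        calc (2 : Nat) ≤ 10 ^ 1 := by norm_num
        _ ≤ 10 ^ sz := Nat.pow_le_pow_right (by norm_num) hsz
      have hsize : PySem.Int.floordiv (L : Int) (p : Int) = ((sz : Nat) : Int) := by
        exact_mod_cast PySem.Int.floordiv_natCast L p
      have hbase : (10 : Int) ^ (((sz : Nat) : Int)).toNat = ((BB : Nat) : Int) := by
        rw [Int.toNat_natCast, hBBdef]; push_cast; rfl
      have hfirst : PySem.Int.mod (N : Int) ((BB : Nat) : Int) = ((N % BB : Nat) : Int) := by
        exact_mod_cast PySem.Int.mod_natCast N BB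
      have hlow : 10 ^ (L - 1) ≤ N := by
        have := Nat.pow_log_le_self 10 (by omega : N ≠ 0)
        simpa [hLdef] using this
      have hupp : N < 10 ^ L := Nat.lt_pow_succ_log_self (by norm_num) N
      have hlowB : BB ^ (p - 1) ≤ N := by
        have h1 : BB ^ (p - 1) = 10 ^ (sz * (p - 1)) := by rw [hBBdef, ← pow_mul]
        have h2 : sz * (p - 1) = L - sz := by
          have h2a : sz * (p - 1) = sz * p - sz := by rw [Nat.mul_sub, Nat.mul_one]
          rw [h2a, Nat.mul_comm sz p, hLsz]
        rw [h1, h2]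
        exact le_trans (Nat.pow_le_pow_right (by norm_num) (by omega)) hlow
      have huppB : N < BB ^ p := by
        have h1 : BB ^ p = 10 ^ (sz * p) := by rw [hBBdef, ← pow_mul]
        rw [h1, Nat.mul_comm, hLsz]
        exact hupp
      have hloop := pvChunkLoop_spec BB ((N % BB : Nat) : Int) hBB p N N le_rfl
        (fun _ => hlowB) huppB
      have hs : (PySem.Int.toStr (N : Int)).toList = pvPad L N := by
        rw [PySem.Int.toList_toStr, PySem.Int.toChars, if_neg (by omega), htoNat,
          pvToDigits_eq_pad]
      -- identify each chunk with a padded base-BB digit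
      have hchunk : ∀ k < p,
          PySem.Str.slice (PySem.Int.toStr (N : Int))
              (some ((k : Int) * ((sz : Nat) : Int))) (some (((k : Int) + 1) * ((sz : Nat) : Int)))
            = String.ofList (pvPad sz (N / BB ^ (p - 1 - k) % BB)) := by
        intro k hk
        rw [PySem.Str.slice]
        congr 1
        rw [PySem.Chars.slice_eq_listSlice]
        have hb1 : (k : Int) * ((sz : Nat) : Int) = ((k * sz : Nat) : Int) := by push_cast; ring
        have hb2 : ((k : Int) + 1) * ((sz : Nat) : Int) = ((k * sz + sz : Nat) : Int) := by
          push_cast; ring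
        rw [hb1, hb2, PySem.List.slice_natCast, hs]
        have hsub : k * sz + sz - k * sz = sz := by omega
        rw [hsub, pvPad_chunk L (k * sz) sz N (by
          have : (k + 1) * sz ≤ p * sz := Nat.mul_le_mul_right sz (by omega)
          rw [Nat.succ_mul] at this
          omega)]
        have hexp : L - k * sz - sz = (p - 1 - k) * sz := by
          have h3 : (p - 1 - k) * sz = p * sz - (k + 1) * sz := by
            rw [← Nat.sub_mul]
            congr 1
            omega
          rw [h3, Nat.succ_mul, hLsz]
          omega
        rw [hexp]
        have hpw : (10 : Nat) ^ ((p - 1 - k) * sz) = BB ^ (p - 1 - k) := by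
          rw [hBBdef, ← pow_mul, Nat.mul_comm]
        rw [hpw, pvPad_mod sz]
      -- non-emptiness of the chunk list
      have hne : (PySem.List.pyRange 0 (p : Int) 1).map
          (fun i => PySem.Str.slice (PySem.Int.toStr (N : Int))
            (some (i * ((sz : Nat) : Int)))
            (some ((i + 1) * ((sz : Nat) : Int)))) ≠ [] := by
        simp [PySem.List.pyRange_one]
        omega
      rw [htoNat, hsize, hbase, hfirst, Bool.eq_iff_iff, pvSetLenOne _ hne, hloop]
      -- reduce chunk membership to indices
      have hmem : ∀ x, x ∈ (PySem.List.pyRange 0 (p : Int) 1).map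
          (fun i => PySem.Str.slice (PySem.Int.toStr (N : Int))
            (some (i * ((sz : Nat) : Int))) (some ((i + 1) * ((sz : Nat) : Int))))
          ↔ ∃ k < p, x = String.ofList (pvPad sz (N / BB ^ (p - 1 - k) % BB)) := by
        intro x
        rw [PySem.List.pyRange_one, List.map_map]
        simp only [List.mem_map, List.mem_range]
        constructor
        · rintro ⟨k, hk, rfl⟩
          have hk' : k < p := by simpa using hk
          refine ⟨k, hk', ?_⟩
          have := hchunk k hk'
          simpa using this
        · rintro ⟨k, hk, rfl⟩
          refine ⟨k, by simpa using hk, ?_⟩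
          have := hchunk k hk
          simpa using this
      constructor
      · -- chunks all equal → every base-BB digit equals the lowest
        intro h i hi
        have h0 : 0 < p := by omega
        have e := h _ ((hmem _).mpr ⟨p - 1 - i, by omega, rfl⟩)
                    _ ((hmem _).mpr ⟨p - 1 - 0, by omega, rfl⟩)
        have e' := String.toList_inj.mpr e
        rw [String.toList_ofList, String.toList_ofList] at e'
        have eN := pvPad_inj sz _ _ (Nat.mod_lt _ (by omega)) (Nat.mod_lt _ (by omega)) e'
        have hi1 : p - 1 - (p - 1 - i) = i := by omega
        have hi0 : p - 1 - (p - 1 - 0) = 0 := by omega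
        rw [hi1, hi0] at eN
        rw [pow_zero, Nat.div_one] at eN
        exact_mod_cast congrArg (fun n : Nat => (n : Int)) eN
      · -- every base-BB digit equals the lowest → chunks all equal
        intro h x hx y hy
        obtain ⟨k, hk, rfl⟩ := (hmem _).mp hx
        obtain ⟨k', hk', rfl⟩ := (hmem _).mp hy
        have hcast : ∀ i < p, N / BB ^ i % BB = N % BB := by
          intro i hi
          have := h i hi
          have : (N / BB ^ i % BB : Nat) = (N % BB : Nat) := by exact_mod_cast this
          exact this
        rw [hcast (p - 1 - k) (by omega), hcast (p - 1 - k') (by omega)]
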